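-- pv_equiv track=rewrite | github.com/nripankadas07/expand | src/expand/_core.py | _next_stop
-- ===== SOURCE A (Python) =====
-- def _next_stop(col, stops):
--     for s in stops:
--         if s > col:
--             return s
--     if len(stops) == 1:
--         period = stops[0]
--     else:
--         period = stops[-1] - stops[-2]
--     after = stops[-1]
--     while after <= col:
--         after += period
--     return after
-- ===== SOURCE B (Python) =====
-- def _next_stop(col, stops):
--     hit = next((s for s in stops if s > col), None)
--     if hit is not None:
--         return hit
--     last = stops[-1]
--     period = stops[0] if len(stops) == 1 else last - stops[-2]
--     return last + period * ((col - last) // period + 1)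
-- ===== Notes on version B (the rewrite author's own statement) =====
-- stated objective: alternative
-- what changed: B replaces A's element-by-element while loop that repeatedly adds the period until it overshoots col with a closed-form floor-division formula computing the overshoot in one step, and expresses the initial scan as a single next(filter) lookup.
import Mathlib
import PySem

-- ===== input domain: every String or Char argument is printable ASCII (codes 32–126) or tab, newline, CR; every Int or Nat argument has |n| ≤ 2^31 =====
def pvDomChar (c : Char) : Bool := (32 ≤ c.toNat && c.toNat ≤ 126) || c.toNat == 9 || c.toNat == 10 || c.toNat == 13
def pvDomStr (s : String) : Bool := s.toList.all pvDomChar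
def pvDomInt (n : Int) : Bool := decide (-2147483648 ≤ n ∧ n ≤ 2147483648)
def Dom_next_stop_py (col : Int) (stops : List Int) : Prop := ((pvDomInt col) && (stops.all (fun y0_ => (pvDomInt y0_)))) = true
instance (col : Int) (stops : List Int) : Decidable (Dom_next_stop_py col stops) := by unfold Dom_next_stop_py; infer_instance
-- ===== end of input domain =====

-- B replaces A's repeated-addition while loop with a closed-form floor-division formula for the periodic overshoot (alternative algorithm, same measured cost).

-- ===== PORT A =====
-- the 'for s in stops: if s > col: return s' scan
def pvScanA (col : Int) : List Int → Option Int
  | [] => none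
  | s :: rest => if s > col then some s else pvScanA col rest

-- the 'while after <= col: after += period' loop; the 0 < period guard only makes the
-- recursion total — Python diverges when period ≤ 0 and after ≤ col, which Pre_ excludes
def pvWhileA (col period after : Int) : Int :=
  if _h : 0 < period ∧ after ≤ col then pvWhileA col period (after + period) else after
termination_by (col - after + 1).toNat
decreasing_by omega

def next_stop_py (col : Int) (stops : List Int) : Int :=
  match pvScanA col stops with
  | some s => s
  | none =>
    let period : Int :=
      if stops.length = 1 then (PySem.List.pyGet? stops 0).getD 0
      else (PySem.List.pyGet? stops (-1)).getD 0 - (PySem.List.pyGet? stops (-2)).getD 0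
    let after : Int := (PySem.List.pyGet? stops (-1)).getD 0
    pvWhileA col period after

-- ===== PORT B =====
def next_stop_py_alt (col : Int) (stops : List Int) : Int :=
  match stops.find? (fun s => decide (col < s)) with
  | some s => s
  | none =>
    let last : Int := (PySem.List.pyGet? stops (-1)).getD 0
    let period : Int :=
      if stops.length = 1 then (PySem.List.pyGet? stops 0).getD 0
      else last - (PySem.List.pyGet? stops (-2)).getD 0
    last + period * (PySem.Int.floordiv (col - last) period + 1)

-- ===== PRECONDITION & SPEC =====
-- Pre_ excludes exactly: empty stops (A raises IndexError at stops[-1]/stops[0]) and the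
-- inputs where no stop exceeds col and the extrapolation period is ≤ 0 (A's while loop diverges).
def Pre_next_stop_py (col : Int) (stops : List Int) : Prop :=
  stops ≠ [] ∧
    (stops.any (fun s => decide (col < s)) = true ∨
      0 < (if stops.length = 1 then (PySem.List.pyGet? stops 0).getD 0
           else (PySem.List.pyGet? stops (-1)).getD 0 - (PySem.List.pyGet? stops (-2)).getD 0))
instance (col : Int) (stops : List Int) : Decidable (Pre_next_stop_py col stops) := by
  unfold Pre_next_stop_py; infer_instance
def pvWitness_next_stop_py : Int × List Int := (5, [2, 4, 7])

def Spec_next_stop_py (col : Int) (stops : List Int) (out : Int) : Prop := out = next_stop_py_alt col stops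
instance (col : Int) (stops : List Int) (out : Int) : Decidable (Spec_next_stop_py col stops out) := by unfold Spec_next_stop_py; infer_instance

-- ===== CLAIM (what is proved, stated in full; the proofs are below) =====
def Claim_equal_next_stop_py : Prop := ∀ (col : Int) (stops : List Int), Dom_next_stop_py col stops → Pre_next_stop_py col stops → Spec_next_stop_py col stops (next_stop_py col stops)

-- ===== LEMMAS AND PROOFS =====

lemma pvScanA_eq_find? (col : Int) (stops : List Int) :
    pvScanA col stops = stops.find? (fun s => decide (col < s)) := by
  induction stops with
  | nil => rfl
  | cons s rest ih =>
    by_cases h : col < s <;> simp [pvScanA, h, ih]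

lemma pvWhile_closed (n : Nat) : ∀ (col period after : Int),
    (col - after + 1).toNat ≤ n → 0 < period → after ≤ col →
    pvWhileA col period after
      = after + period * (PySem.Int.floordiv (col - after) period + 1) := by
  induction n with
  | zero => intro col period after hle hp ha; omega
  | succ n ih =>
    intro col period after hle hp ha
    rw [pvWhileA, dif_pos ⟨hp, ha⟩]
    by_cases hc : after + period ≤ col
    · rw [ih col period (after + period) (by omega) hp hc]
      have hbr := (PySem.Int.floordiv_eq_iff_of_pos hp
        (a := col - (after + period)) (q := PySem.Int.floordiv (col - (after + period)) period)).mp rfl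
      have : PySem.Int.floordiv (col - after) period
          = PySem.Int.floordiv (col - (after + period)) period + 1 := by
        rw [PySem.Int.floordiv_eq_iff_of_pos hp]
        constructor <;> nlinarith [hbr.1, hbr.2]
      rw [this]; ring
    · rw [pvWhileA, dif_neg (by intro h; exact hc h.2)]
      have : PySem.Int.floordiv (col - after) period = 0 := by
        rw [PySem.Int.floordiv_eq_iff_of_pos hp]
        constructor <;> nlinarith
      rw [this]; ring

-- ===== VERDICT (by name: the statement is the Claim_ definition above) =====
theorem next_stop_py_spec : Claim_equal_next_stop_py := by
  intro col stops _ hpre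
  obtain ⟨hne, hper⟩ := hpre
  unfold Spec_next_stop_py next_stop_py next_stop_py_alt
  rw [pvScanA_eq_find?]
  cases hfind : stops.find? (fun s => decide (col < s)) with
  | some s => rfl
  | none =>
    simp only []
    have hall : ∀ x ∈ stops, ¬ col < x := by
      intro x hx
      have := List.find?_eq_none.mp hfind x hx
      simpa using this
    have hp : 0 < (if stops.length = 1 then (PySem.List.pyGet? stops 0).getD 0
        else (PySem.List.pyGet? stops (-1)).getD 0 - (PySem.List.pyGet? stops (-2)).getD 0) := by
      rcases hper with h | h
      · exfalso
        obtain ⟨x, hx, hcx⟩ := List.any_eq_true.mp h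
        exact hall x hx (by simpa using hcx)
      · exact h
    have hlastmem : (PySem.List.pyGet? stops (-1)).getD 0 ∈ stops := by
      rw [PySem.List.pyGet?_neg_one, List.getLast?_eq_some_getLast hne]
      exact List.getLast_mem hne
    have hlast : (PySem.List.pyGet? stops (-1)).getD 0 ≤ col :=
      le_of_not_gt (hall _ hlastmem)
    exact pvWhile_closed ((col - (PySem.List.pyGet? stops (-1)).getD 0 + 1).toNat)
      col _ _ le_rfl hp hlast
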